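-- pv_equiv track=rewrite | github.com/aiventures/tools | img_file_info_xls.py | exiftool_get_descriptions
-- ===== SOURCE A (Python) =====
-- def exiftool_get_descriptions(img_info_dict:dict):
--     """ creates image description dictionary """
--     imginfo_description_dict={}
--     for fp,img_info in img_info_dict.items():
--         s=""
--         if img_info.get("Title",None):s+=img_info["Title"]
--         s+=" ["
--         if img_info.get("Make",None):s+=img_info["Make"]
--         if img_info.get("Model",None):s+=" "+img_info["Model"]
--         if img_info.get("LensModel",None): s+="|"+img_info["LensModel"]
--         if img_info.get("FocalLength",None): s+=" "+str(img_info["FocalLength"])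
--         if img_info.get("ShutterSpeed",None): s+=" "+str(img_info["ShutterSpeed"])+"s"
--         if img_info.get("Aperture",None): s+=" F"+str(img_info["Aperture"])
--         if img_info.get("ISO",None): s+=" ISO"+str(img_info["ISO"])
--         if img_info.get("LightValue",None): s+=", "+str(img_info["LightValue"])+"LV"
--         if img_info.get("Software",None): s+=", Software: "+img_info["Software"]
--         s+="]"
--         if img_info.get("PictureEffect",None): s+="\nPicture Effect: "+img_info["PictureEffect"]+" "
--         if img_info.get("PictureProfile",None): s+="(Profile: "+img_info["PictureProfile"]+")"
--
--         if img_info.get("SpecialInstructions",None): s+="\nGeolink: "+img_info["SpecialInstructions"]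
--
--         imginfo_description_dict[str(fp)]=s
--         img_info["Description"]=s+"]"
--
--     # return img_info_dict
--     return imginfo_description_dict
-- ===== SOURCE B (Python) =====
-- # Recursive template-interpreter version: the whole description is one uniform
-- # token stream (literals and conditional fields in a tiny mini-language) rendered
-- # back-to-front by structural recursion, instead of 13 sequential conditional
-- # appends to a mutable accumulator.
--
-- _TEMPLATE = [
--     ("field", "Title", "", ""),
--     ("lit", " ["),
--     ("field", "Make", "", ""),
--     ("field", "Model", " ", ""),
--     ("field", "LensModel", "|", ""),
--     ("field", "FocalLength", " ", ""),
--     ("field", "ShutterSpeed", " ", "s"),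
--     ("field", "Aperture", " F", ""),
--     ("field", "ISO", " ISO", ""),
--     ("field", "LightValue", ", ", "LV"),
--     ("field", "Software", ", Software: ", ""),
--     ("lit", "]"),
--     ("field", "PictureEffect", "\nPicture Effect: ", " "),
--     ("field", "PictureProfile", "(Profile: ", ")"),
--     ("field", "SpecialInstructions", "\nGeolink: ", ""),
-- ]
--
--
-- def _render(tokens, info):
--     """renders the tail of the template first, then prepends this token's text"""
--     if not tokens:
--         return ""
--     tok = tokens[0]
--     tail = _render(tokens[1:], info)
--     if tok[0] == "lit":
--         return tok[1] + tail
--     v = info.get(tok[1])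
--     if v:
--         return tok[2] + str(v) + tok[3] + tail
--     return tail
--
--
-- def exiftool_get_descriptions(img_info_dict: dict):
--     """creates image description dictionary (template-interpreter version)"""
--     out = {}
--     for fp, info in img_info_dict.items():
--         s = _render(_TEMPLATE, info)
--         out[str(fp)] = s
--         info["Description"] = s + "]"
--     return out
-- ===== Notes on version B (the rewrite author's own statement) =====
-- stated objective: alternative
-- what changed: B renders each description by recursive back-to-front interpretation of one uniform token stream (literals and conditional fields in a tiny template mini-language), instead of A's 13 inline if-statements appending in sequence to a mutable accumulator; both also perform the same in-place Description mutation, the theorems are about the return value.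
import Mathlib
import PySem

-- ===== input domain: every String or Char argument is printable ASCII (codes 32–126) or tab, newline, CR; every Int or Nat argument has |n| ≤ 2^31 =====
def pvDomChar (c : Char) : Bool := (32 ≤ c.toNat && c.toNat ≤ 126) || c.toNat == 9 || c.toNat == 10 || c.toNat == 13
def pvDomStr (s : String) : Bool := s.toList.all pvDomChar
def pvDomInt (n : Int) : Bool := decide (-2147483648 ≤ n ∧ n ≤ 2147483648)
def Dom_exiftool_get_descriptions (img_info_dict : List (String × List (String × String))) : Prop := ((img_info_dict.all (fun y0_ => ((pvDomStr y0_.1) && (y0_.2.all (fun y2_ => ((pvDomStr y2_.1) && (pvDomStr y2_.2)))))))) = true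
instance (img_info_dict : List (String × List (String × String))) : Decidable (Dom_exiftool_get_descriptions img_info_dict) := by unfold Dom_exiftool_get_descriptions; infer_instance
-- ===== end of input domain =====

-- ===== PORT A =====
-- B renders each description by recursive back-to-front interpretation of a uniform token template
-- instead of A's 13 sequential conditional appends (alternative decomposition, same cost);
-- both Pythons also set info["Description"] in place identically — the theorems are about the RETURN value.
-- truthiness of img_info.get(k, None): str values, so truthy ↔ present and nonempty
def pvTruthy (info : PySem.Dict String String) (k : String) : Bool := info.getD k "" != ""

-- literal transliteration of A's per-entry body building s
def pvDescA (info : PySem.Dict String String) : String :=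
  let s := ""
  let s := if pvTruthy info "Title" then s ++ info.getD "Title" "" else s
  let s := s ++ " ["
  let s := if pvTruthy info "Make" then s ++ info.getD "Make" "" else s
  let s := if pvTruthy info "Model" then s ++ " " ++ info.getD "Model" "" else s
  let s := if pvTruthy info "LensModel" then s ++ "|" ++ info.getD "LensModel" "" else s
  let s := if pvTruthy info "FocalLength" then s ++ " " ++ info.getD "FocalLength" "" else s
  let s := if pvTruthy info "ShutterSpeed" then s ++ " " ++ info.getD "ShutterSpeed" "" ++ "s" else s
  let s := if pvTruthy info "Aperture" then s ++ " F" ++ info.getD "Aperture" "" else s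
  let s := if pvTruthy info "ISO" then s ++ " ISO" ++ info.getD "ISO" "" else s
  let s := if pvTruthy info "LightValue" then s ++ ", " ++ info.getD "LightValue" "" ++ "LV" else s
  let s := if pvTruthy info "Software" then s ++ ", Software: " ++ info.getD "Software" "" else s
  let s := s ++ "]"
  let s := if pvTruthy info "PictureEffect" then s ++ "\nPicture Effect: " ++ info.getD "PictureEffect" "" ++ " " else s
  let s := if pvTruthy info "PictureProfile" then s ++ "(Profile: " ++ info.getD "PictureProfile" "" ++ ")" else s
  let s := if pvTruthy info "SpecialInstructions" then s ++ "\nGeolink: " ++ info.getD "SpecialInstructions" "" else s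
  s

def exiftool_get_descriptions (img_info_dict : List (String × List (String × String))) : List (String × String) :=
  ((PySem.Dict.ofList img_info_dict).items.foldl
      (fun (acc : PySem.Dict String String) fp_info =>
        acc.insert fp_info.1 (pvDescA (PySem.Dict.ofList fp_info.2)))
      PySem.Dict.empty).items

-- ===== PORT B =====
-- token mini-language of Source B: ("lit", text) and ("field", key, prefix, suffix)
inductive PvTok : Type
  | lit : String → PvTok
  | field : String → String → String → PvTok
deriving DecidableEq, Repr

def pvTemplate : List PvTok :=
  [.field "Title" "" "", .lit " [",
   .field "Make" "" "", .field "Model" " " "", .field "LensModel" "|" "",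
   .field "FocalLength" " " "", .field "ShutterSpeed" " " "s", .field "Aperture" " F" "",
   .field "ISO" " ISO" "", .field "LightValue" ", " "LV", .field "Software" ", Software: " "",
   .lit "]",
   .field "PictureEffect" "\nPicture Effect: " " ", .field "PictureProfile" "(Profile: " ")",
   .field "SpecialInstructions" "\nGeolink: " ""]

-- Source B's _render: renders the tail first, then prepends this token's text
def pvRender : List PvTok → PySem.Dict String String → String
  | [], _ => ""
  | tok :: rest, info =>
    let tail := pvRender rest info
    match tok with
    | .lit x => x ++ tail
    | .field k pre suf =>
      if info.getD k "" != "" then pre ++ info.getD k "" ++ suf ++ tail else tail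

def exiftool_get_descriptions_alt (img_info_dict : List (String × List (String × String))) : List (String × String) :=
  ((PySem.Dict.ofList img_info_dict).items.foldl
      (fun (acc : PySem.Dict String String) fp_info =>
        acc.insert fp_info.1 (pvRender pvTemplate (PySem.Dict.ofList fp_info.2)))
      PySem.Dict.empty).items

-- ===== PRECONDITION & SPEC =====
def Spec_exiftool_get_descriptions (img_info_dict : List (String × List (String × String))) (out : List (String × String)) : Prop := out = exiftool_get_descriptions_alt img_info_dict
instance (img_info_dict : List (String × List (String × String))) (out : List (String × String)) : Decidable (Spec_exiftool_get_descriptions img_info_dict out) := by unfold Spec_exiftool_get_descriptions; infer_instance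

-- ===== CLAIM =====
def Claim_equal_exiftool_get_descriptions : Prop := ∀ (img_info_dict : List (String × List (String × String))), Dom_exiftool_get_descriptions img_info_dict → Spec_exiftool_get_descriptions img_info_dict (exiftool_get_descriptions img_info_dict)

-- ===== LEMMAS AND PROOFS =====
-- one conditional piece of the description
def pvPiece (info : PySem.Dict String String) (k pre suf : String) : String :=
  if info.getD k "" != "" then pre ++ info.getD k "" ++ suf else ""

theorem stepA0 (info : PySem.Dict String String) (k s : String) :
    (if pvTruthy info k then s ++ info.getD k "" else s) = s ++ pvPiece info k "" "" := by
  simp only [pvPiece, pvTruthy]; split <;> simp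

theorem stepA1 (info : PySem.Dict String String) (p k s : String) :
    (if pvTruthy info k then s ++ p ++ info.getD k "" else s) = s ++ pvPiece info k p "" := by
  simp only [pvPiece, pvTruthy]; split <;> simp [String.append_assoc]

theorem stepA2 (info : PySem.Dict String String) (p k q s : String) :
    (if pvTruthy info k then s ++ p ++ info.getD k "" ++ q else s) = s ++ pvPiece info k p q := by
  simp only [pvPiece, pvTruthy]; split <;> simp [String.append_assoc]

theorem stepB (info : PySem.Dict String String) (k pre suf t : String) :
    (if info.getD k "" != "" then pre ++ info.getD k "" ++ suf ++ t else t) = pvPiece info k pre suf ++ t := by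
  simp only [pvPiece]; split <;> simp [String.append_assoc]

theorem desc_eq (info : PySem.Dict String String) :
    pvDescA info = pvRender pvTemplate info := by
  simp only [pvDescA, pvTemplate, pvRender, stepA0, stepA1, stepA2, stepB]
  simp [String.append_assoc]

theorem exiftool_get_descriptions_spec : Claim_equal_exiftool_get_descriptions := by
  intro l _
  unfold Spec_exiftool_get_descriptions exiftool_get_descriptions exiftool_get_descriptions_alt
  simp only [desc_eq]
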